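-- pv_equiv track=rewrite | github.com/htrex/django-brevo-analytics | brevo_analytics/sender_utils.py | is_sender_allowed
-- ===== SOURCE A (Python) =====
-- def is_sender_allowed(sender, allowed_senders):
--     """Check whether *sender* matches any entry in *allowed_senders*.
--
--     Rules:
--     - Entries starting with ``@`` are domain patterns and match via
--       case-insensitive ``endswith``.
--     - All other entries are exact email matches (case-insensitive).
--     - Returns ``True`` when *allowed_senders* is empty (no filtering).
--     """
--     if not allowed_senders:
--         return True
--     if not sender:
--         return False
--     sender_lower = sender.lower()
--     for entry in allowed_senders:
--         entry_lower = entry.lower()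
--         if entry_lower.startswith('@'):
--             if sender_lower.endswith(entry_lower):
--                 return True
--         else:
--             if sender_lower == entry_lower:
--                 return True
--     return False
-- ===== SOURCE B (Python) =====
-- def is_sender_allowed(sender, allowed_senders):
--     if not allowed_senders:
--         return True
--     if not sender:
--         return False
--     s = sender.lower()
--     keys = {s} | {s[i:] for i, c in enumerate(s) if c == '@'}
--     patterns = {e.lower() for e in allowed_senders}
--     return not keys.isdisjoint(patterns)
-- ===== Notes on version B (the rewrite author's own statement) =====
-- stated objective: alternative
-- what changed: B inverts the scan direction: instead of looping over patterns and branching per entry, it enumerates the sender's candidate match keys (the whole lowercased address plus every suffix starting at an '@') as a set and intersects that set with the set of lowercased patterns, using the fact that an exact pattern can only equal the full address and a domain pattern matches iff it equals one of the '@'-suffixes.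
import Mathlib
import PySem

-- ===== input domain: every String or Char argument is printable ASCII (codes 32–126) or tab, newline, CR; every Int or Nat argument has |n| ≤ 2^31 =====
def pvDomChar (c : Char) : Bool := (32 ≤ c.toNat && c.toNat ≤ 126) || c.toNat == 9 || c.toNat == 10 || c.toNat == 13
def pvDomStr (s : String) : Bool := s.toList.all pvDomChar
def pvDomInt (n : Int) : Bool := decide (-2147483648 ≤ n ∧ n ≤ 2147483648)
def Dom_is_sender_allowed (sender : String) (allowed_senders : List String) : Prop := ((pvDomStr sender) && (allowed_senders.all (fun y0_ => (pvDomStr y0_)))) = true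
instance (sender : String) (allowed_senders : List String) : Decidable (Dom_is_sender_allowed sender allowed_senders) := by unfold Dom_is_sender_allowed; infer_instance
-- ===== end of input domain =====

-- B inverts the scan: it builds the set of the sender's candidate match keys (the whole
-- lowercased address plus each suffix starting at an '@') and intersects it with the set of
-- lowercased patterns, instead of A's per-pattern branching loop; objective: alternative.

-- ===== PORT A =====
-- the for-loop of A: early-return True on a match, False after the loop
def pvLoopA (sender_lower : String) : List String → Bool
  | [] => false
  | entry :: rest =>
    let entry_lower := PySem.Str.lower entry
    if PySem.Str.startswith entry_lower "@" then
      if PySem.Str.endswith sender_lower entry_lower then true else pvLoopA sender_lower rest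
    else
      if sender_lower == entry_lower then true else pvLoopA sender_lower rest

def is_sender_allowed (sender : String) (allowed_senders : List String) : Bool :=
  if allowed_senders = [] then true
  else if sender = "" then false
  else pvLoopA (PySem.Str.lower sender) allowed_senders

-- ===== PORT B =====
def is_sender_allowed_alt (sender : String) (allowed_senders : List String) : Bool :=
  if allowed_senders = [] then true
  else if sender = "" then false
  else
    let s := PySem.Chars.lower sender.toList
    -- keys = {s} | {s[i:] for i, c in enumerate(s) if c == '@'}
    let keys := PySem.Set.union (PySem.Set.ofList [s])
      (PySem.Set.ofList ((PySem.List.enumerate s 0).filterMap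
        (fun p => if p.2 = '@' then some (s.drop p.1.toNat) else none)))
    -- patterns = {e.lower() for e in allowed_senders}
    let patterns := PySem.Set.ofList (allowed_senders.map (fun e => PySem.Chars.lower e.toList))
    !(PySem.Set.isdisjoint keys patterns)

-- ===== PRECONDITION & SPEC =====
def Spec_is_sender_allowed (sender : String) (allowed_senders : List String) (out : Bool) : Prop := out = is_sender_allowed_alt sender allowed_senders
instance (sender : String) (allowed_senders : List String) (out : Bool) : Decidable (Spec_is_sender_allowed sender allowed_senders out) := by unfold Spec_is_sender_allowed; infer_instance

-- ===== CLAIM (what is proved, stated in full; the proofs are below) =====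
def Claim_equal_is_sender_allowed : Prop := ∀ (sender : String) (allowed_senders : List String), Dom_is_sender_allowed sender allowed_senders → Spec_is_sender_allowed sender allowed_senders (is_sender_allowed sender allowed_senders)

-- ===== LEMMAS AND PROOFS =====

-- the per-entry test A performs, on the char-list level
def pvMatchC (S E : List Char) : Bool :=
  if PySem.Chars.startswith E ['@'] then PySem.Chars.endswith S E else S == E

-- A's loop is an 'any' of the per-entry test
theorem pvLoopA_eq_any (sl : String) (l : List String) :
    pvLoopA sl l = l.any (fun e => pvMatchC sl.toList (PySem.Chars.lower e.toList)) := by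
  induction l with
  | nil => simp [pvLoopA]
  | cons e rest ih =>
    have hsw : PySem.Str.startswith (PySem.Str.lower e) "@"
        = PySem.Chars.startswith (PySem.Chars.lower e.toList) ['@'] := by
      simp [PySem.Str.startswith, PySem.Str.lower]
    have hew : PySem.Str.endswith sl (PySem.Str.lower e)
        = PySem.Chars.endswith sl.toList (PySem.Chars.lower e.toList) := by
      simp [PySem.Str.endswith, PySem.Str.lower]
    have heq : (sl == PySem.Str.lower e) = (sl.toList == PySem.Chars.lower e.toList) := by
      rw [Bool.eq_iff_iff]
      simp [String.ext_iff, PySem.Str.lower]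
    have step : pvLoopA sl (e :: rest)
        = (pvMatchC sl.toList (PySem.Chars.lower e.toList) || pvLoopA sl rest) := by
      simp only [pvLoopA, pvMatchC]
      rw [hsw, hew, heq]
      by_cases h : PySem.Chars.startswith (PySem.Chars.lower e.toList) ['@'] = true
      · simp only [h, if_pos]
        by_cases h2 : PySem.Chars.endswith sl.toList (PySem.Chars.lower e.toList) = true <;>
          simp [h2]
      · simp only [Bool.not_eq_true] at h
        simp only [h, Bool.false_eq_true, if_false]
        by_cases h2 : (sl.toList == PySem.Chars.lower e.toList) = true <;> simp [h2]
    rw [step, List.any_cons, ih]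

-- membership in B's key family is exactly A's per-entry test
theorem pvMatchC_iff (S E : List Char) :
    (E = S ∨ ∃ k, ∃ _ : k < S.length, S[k] = '@' ∧ E = S.drop k) ↔ pvMatchC S E = true := by
  unfold pvMatchC
  by_cases hsw : PySem.Chars.startswith E ['@'] = true
  · have hsw' := (PySem.Chars.startswith_iff E ['@']).mp hsw
    obtain ⟨E', rfl⟩ : ∃ E', E = '@' :: E' := by
      rcases hsw' with ⟨t, ht⟩
      cases E with
      | nil => simp at ht
      | cons c cs =>
        simp only [List.singleton_append, List.cons.injEq] at ht
        exact ⟨cs, by rw [ht.1]⟩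
    simp only [hsw, if_pos, PySem.Chars.endswith_iff]
    constructor
    · rintro (rfl | ⟨k, hk, _, hdrop⟩)
      · exact List.suffix_refl _
      · rw [hdrop]; exact List.drop_suffix k S
    · rintro ⟨t, ht⟩
      right
      have hlen : t.length < S.length := by rw [← ht]; simp
      refine ⟨t.length, hlen, ?_, ?_⟩
      · have h2 : (t ++ '@' :: E')[t.length]'(by simp) = '@' := by
          rw [List.getElem_append_right (Nat.le_refl _)]
          simp
        simp only [ht] at h2
        exact h2
      · rw [← ht, List.drop_left]
  · simp only [hsw, Bool.false_eq_true, if_false, beq_iff_eq]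
    constructor
    · rintro (rfl | ⟨k, hk, hat, rfl⟩)
      · rfl
      · exfalso
        apply hsw
        rw [PySem.Chars.startswith_iff, List.drop_eq_getElem_cons hk, hat]
        exact ⟨_, rfl⟩
    · rintro rfl; left; rfl

-- unfolding the membership of B's key set
theorem pvMem_keysSet (S x : List Char) :
    (x ∈ PySem.Set.union (PySem.Set.ofList [S])
      (PySem.Set.ofList ((PySem.List.enumerate S 0).filterMap
        (fun p => if p.2 = '@' then some (S.drop p.1.toNat) else none))))
    ↔ x = S ∨ ∃ k, ∃ _ : k < S.length, S[k] = '@' ∧ x = S.drop k := by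
  rw [PySem.Set.mem_union]
  simp only [PySem.Set.mem_ofList, List.mem_singleton, List.mem_filterMap,
    PySem.List.mem_enumerate_iff]
  constructor
  · rintro (rfl | ⟨p, ⟨k, hk, rfl⟩, hp⟩)
    · left; rfl
    · right
      simp only at hp
      by_cases hat : S[k] = '@'
      · refine ⟨k, hk, hat, ?_⟩
        rw [if_pos hat] at hp
        simp only [Option.some.injEq] at hp
        rw [← hp]
        norm_num
      · rw [if_neg hat] at hp; exact absurd hp (by simp)
  · rintro (rfl | ⟨k, hk, hat, rfl⟩)
    · left; rfl
    · right
      refine ⟨((0 : Int) + (k : Int), S[k]), ⟨k, hk, rfl⟩, ?_⟩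
      simp [hat]

-- ===== VERDICT (by name: the statement is the Claim_ definition above) =====
theorem is_sender_allowed_spec : Claim_equal_is_sender_allowed := by
  intro sender allowed _
  unfold Spec_is_sender_allowed is_sender_allowed is_sender_allowed_alt
  by_cases h0 : allowed = []
  · simp [h0]
  · by_cases h1 : sender = ""
    · simp [h0, h1]
    · simp only [h0, h1, if_false]
      rw [pvLoopA_eq_any, Bool.eq_iff_iff]
      have hbridge : (PySem.Str.lower sender).toList = PySem.Chars.lower sender.toList := by
        simp [PySem.Str.lower]
      rw [hbridge]
      rw [List.any_eq_true, Bool.not_eq_true', ← Bool.not_eq_true,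
        PySem.Set.isdisjoint_iff]
      push Not
      constructor
      · rintro ⟨e, he, hm⟩
        refine ⟨PySem.Chars.lower e.toList, ?_, ?_⟩
        · exact (pvMem_keysSet _ _).mpr ((pvMatchC_iff _ _).mpr hm)
        · rw [PySem.Set.mem_ofList, List.mem_map]; exact ⟨e, he, rfl⟩
      · rintro ⟨x, hx, hp⟩
        rw [PySem.Set.mem_ofList, List.mem_map] at hp
        obtain ⟨e, he, rfl⟩ := hp
        exact ⟨e, he, (pvMatchC_iff _ _).mp ((pvMem_keysSet _ _).mp hx)⟩
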